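-- pv_equiv track=rewrite | github.com/ThalesDaviSouza/ALG | TP3/graph.py | split_graph
-- ===== SOURCE A (Python) =====
-- def split_graph(n, adj):
--   nLeft = n // 2
--   nRight = n - nLeft
--
--   # Mapeia índices originais para as novas posições nas partes
--   mapLeft = list(range(nLeft))
--   mapRight = list(range(nLeft, n))
--
--   # Matrizes de adjacência para cada parte
--   adjLeft = [0] * nLeft
--   adjRight = [0] * nRight
--
--   # Constrói adjacências da parte esquerda
--   for i in range(nLeft):
--     for j in range(nLeft):
--       # Verifica se há aresta entre i e j no grafo original
--       if (adj[i] >> j) & 1: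
--         # Seta bit na posição j para indicar adjacência
--         adjLeft[i] |= (1 << j)
--
--   # Constrói adjacências da parte direita
--   for i, v in enumerate(mapRight):
--     for j, u in enumerate(mapRight):
--       # Verifica se há aresta entre v e u no grafo original
--       if (adj[v] >> u) & 1:
--         # Seta bit na posição j para indicar adjacência
--         adjRight[i] |= (1 << j)
--
--   return nLeft, nRight, adjLeft, adjRight, mapLeft, mapRight
-- ===== SOURCE B (Python) =====
-- def split_graph(n, adj):
--   nLeft = n // 2
--   nRight = n - nLeft
--   # one mask-and-shift per row instead of per-bit inner loops
--   adjLeft = [adj[i] & ((1 << nLeft) - 1) for i in range(nLeft)]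
--   adjRight = [(adj[v] >> nLeft) & ((1 << nRight) - 1) for v in range(nLeft, n)]
--   return nLeft, nRight, adjLeft, adjRight, list(range(nLeft)), list(range(nLeft, n))
-- ===== Notes on version B (the rewrite author's own statement) =====
-- stated objective: faster
-- what changed: B replaces A's quadratic per-bit inner loops (testing and setting one bit per pair of vertices) by one mask-and-shift big-int operation per row: adjLeft row = adj[i] & ((1<<nLeft)-1), adjRight row = (adj[v]>>nLeft) & ((1<<nRight)-1).
import Mathlib
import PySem

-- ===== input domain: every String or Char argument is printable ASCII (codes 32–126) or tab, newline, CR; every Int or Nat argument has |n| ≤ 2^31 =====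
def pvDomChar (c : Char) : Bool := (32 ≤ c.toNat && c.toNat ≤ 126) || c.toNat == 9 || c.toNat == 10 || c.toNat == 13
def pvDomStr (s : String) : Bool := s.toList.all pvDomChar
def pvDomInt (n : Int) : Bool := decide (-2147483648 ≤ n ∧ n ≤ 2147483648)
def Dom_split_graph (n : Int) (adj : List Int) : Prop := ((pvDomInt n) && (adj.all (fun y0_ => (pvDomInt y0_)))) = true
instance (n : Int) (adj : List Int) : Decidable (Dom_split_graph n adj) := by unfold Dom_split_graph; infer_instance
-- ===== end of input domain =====

-- B replaces A's per-bit inner loops by one mask-and-shift per row (objective: faster).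

-- ===== PORT A =====
def split_graph (n : Int) (adj : List Int) : Int × Int × List Int × List Int × List Int × List Int :=
  let nLeft := PySem.Int.floordiv n 2
  let nRight := n - nLeft
  let mapLeft := PySem.List.pyRange 0 nLeft 1
  let mapRight := PySem.List.pyRange nLeft n 1
  let adjLeft0 : List Int := List.replicate nLeft.toNat 0
  let adjRight0 : List Int := List.replicate nRight.toNat 0
  -- for i in range(nLeft): for j in range(nLeft): if (adj[i] >> j) & 1: adjLeft[i] |= (1 << j)
  let adjLeft := (PySem.List.pyRange 0 nLeft 1).foldl (fun l i =>
      PySem.List.pySetD l i ((PySem.List.pyRange 0 nLeft 1).foldl (fun acc j =>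
          if PySem.Int.band (PySem.List.pyGetD adj i 0 >>> j.toNat) 1 = 1
          then PySem.Int.bor acc ((1 : Int) <<< j.toNat) else acc)
        (PySem.List.pyGetD l i 0))) adjLeft0
  -- for i, v in enumerate(mapRight): for j, u in enumerate(mapRight): if (adj[v] >> u) & 1: adjRight[i] |= (1 << j)
  let adjRight := (PySem.List.enumerate mapRight).foldl (fun l p =>
      PySem.List.pySetD l p.1 ((PySem.List.enumerate mapRight).foldl (fun acc q =>
          if PySem.Int.band (PySem.List.pyGetD adj p.2 0 >>> q.2.toNat) 1 = 1
          then PySem.Int.bor acc ((1 : Int) <<< q.1.toNat) else acc)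
        (PySem.List.pyGetD l p.1 0))) adjRight0
  (nLeft, nRight, adjLeft, adjRight, mapLeft, mapRight)

-- ===== PORT B =====
def split_graph_alt (n : Int) (adj : List Int) : Int × Int × List Int × List Int × List Int × List Int :=
  let nLeft := PySem.Int.floordiv n 2
  let nRight := n - nLeft
  -- Python's 1 << nLeft is written (1 <<< nLeft.toNat): exact, since the comprehension bodies
  -- only run when the range is nonempty, i.e. 0 < nLeft (resp. 0 < nRight)
  let adjLeft := (PySem.List.pyRange 0 nLeft 1).map (fun i =>
      PySem.Int.band (PySem.List.pyGetD adj i 0) ((1 : Int) <<< nLeft.toNat - 1))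
  let adjRight := (PySem.List.pyRange nLeft n 1).map (fun v =>
      PySem.Int.band (PySem.List.pyGetD adj v 0 >>> nLeft.toNat) ((1 : Int) <<< nRight.toNat - 1))
  (nLeft, nRight, adjLeft, adjRight, PySem.List.pyRange 0 nLeft 1, PySem.List.pyRange nLeft n 1)

-- ===== PRECONDITION & SPEC =====
-- A (and B) index adj at every position of [0, n); Pre_ excludes exactly the inputs where that
-- raises IndexError, i.e. 0 < n with fewer than n rows.
def Pre_split_graph (n : Int) (adj : List Int) : Prop := n ≤ (adj.length : Int) ∨ n ≤ 0
instance (n : Int) (adj : List Int) : Decidable (Pre_split_graph n adj) := by unfold Pre_split_graph; infer_instance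
def pvWitness_split_graph : Int × List Int := (3, [3, 5, 6])

def Spec_split_graph (n : Int) (adj : List Int) (out : Int × Int × List Int × List Int × List Int × List Int) : Prop := out = split_graph_alt n adj
instance (n : Int) (adj : List Int) (out : Int × Int × List Int × List Int × List Int × List Int) : Decidable (Spec_split_graph n adj out) := by unfold Spec_split_graph; infer_instance

-- ===== CLAIM (what is proved, stated in full; the proofs are below) =====
def Claim_equal_split_graph : Prop := ∀ (n : Int) (adj : List Int), Dom_split_graph n adj → Pre_split_graph n adj → Spec_split_graph n adj (split_graph n adj)

-- ===== LEMMAS AND PROOFS =====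

-- Nat: or-ing in a bit above the value is addition
lemma nat_lor_two_pow_of_lt (m k : Nat) (h : m < 2 ^ k) : m ||| 2 ^ k = m + 2 ^ k := by
  apply Nat.eq_of_testBit_eq
  intro i
  have hadd : m + 2 ^ k = 2 ^ k * 1 + m := by ring
  rw [hadd, Nat.testBit_two_pow_mul_add 1 h]
  rcases lt_trichotomy i k with hi|hi|hi
  · simp [Nat.testBit_two_pow, hi]
    omega
  · subst hi
    simp [Nat.testBit_lt_two_pow h]
  · have h2 : m < 2 ^ i := lt_of_lt_of_le h (Nat.pow_le_pow_right (by norm_num) hi.le)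
    have h1 : (1 : Nat).testBit (i - k) = false := by
      apply Nat.testBit_lt_two_pow
      calc (1:Nat) < 2 ^ 1 := by norm_num
        _ ≤ 2 ^ (i - k) := Nat.pow_le_pow_right (by norm_num) (by omega)
    simp [Nat.testBit_two_pow, Nat.testBit_lt_two_pow h2, h1]
    omega

-- Python's m & ((1 << k) - 1) is m mod 2^k, for every integer m (two's complement)
lemma band_mask (m : Int) (k : Nat) : PySem.Int.band m ((1 : Int) <<< k - 1) = m % (2 ^ k) := by
  have hpow : ((1 : Int) <<< k) = 2 ^ k := by rw [Int.shiftLeft_eq]; ring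
  have h2k : (0 : Int) < 2 ^ k := by positivity
  have hmask : (0 : Int) ≤ 2 ^ k - 1 := by omega
  have htn : ((2 : Int) ^ k - 1).toNat = 2 ^ k - 1 := by
    have : ((2 : Int) ^ k) = ((2 ^ k : Nat) : Int) := by push_cast; ring
    omega
  rw [hpow]
  by_cases hm : 0 ≤ m
  · rw [PySem.Int.band, if_pos hm, if_pos hmask, htn, Nat.and_two_pow_sub_one_eq_mod]
    have hmc : m = ((m.toNat : Nat) : Int) := by omega
    rw [hmc]
    simp
  · rw [PySem.Int.band, if_neg hm, if_pos hmask, htn]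
    set t : Nat := (-m - 1).toNat with ht
    have hmt : m = -(t : Int) - 1 := by omega
    have hand : (2 ^ k - 1) &&& t = t % 2 ^ k := by
      rw [Nat.land_comm, Nat.and_two_pow_sub_one_eq_mod]
    rw [hand]
    have hlt : t % 2 ^ k < 2 ^ k := Nat.mod_lt _ (by positivity)
    have hPt : (2 : Int) ^ k * ((t / 2 ^ k : Nat) : Int) + ((t % 2 ^ k : Nat) : Int) = (t : Int) := by
      exact_mod_cast Nat.div_add_mod t (2 ^ k)
    have hdecomp : m = ((2 ^ k - 1 - (t % 2 ^ k : Nat) : Int)) + 2 ^ k * (-(((t / 2 ^ k : Nat) : Int)) - 1) := by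
      rw [hmt]; linear_combination hPt
    rw [hdecomp, Int.add_mul_emod_self_left,
      Int.emod_eq_of_lt (by push_cast; omega) (by push_cast; omega)]
    have hpow' : ((2 : Int) ^ k) = ((2 ^ k : Nat) : Int) := by push_cast; ring
    omega

-- Python's bor sets a fresh high bit by addition
lemma bor_high_bit (acc : Int) (k : Nat) (h0 : 0 ≤ acc) (h1 : acc < 2 ^ k) :
    PySem.Int.bor acc ((1 : Int) <<< k) = acc + 2 ^ k := by
  have hpow : ((1 : Int) <<< k) = 2 ^ k := by rw [Int.shiftLeft_eq]; ring
  have hpow' : ((2 : Int) ^ k) = ((2 ^ k : Nat) : Int) := by push_cast; ring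
  rw [hpow, PySem.Int.bor, if_pos h0, if_pos (by positivity)]
  have htn : ((2 : Int) ^ k).toNat = 2 ^ k := by omega
  rw [htn, nat_lor_two_pow_of_lt _ _ (by omega)]
  omega

-- splitting a mod at a power of two
lemma emod_two_pow_succ (x : Int) (k : Nat) :
    x % (2 ^ (k + 1)) = x % (2 ^ k) + 2 ^ k * ((x / 2 ^ k) % 2) := by
  have h2k : (0 : Int) < 2 ^ k := by positivity
  have h2k1 : (0 : Int) < 2 ^ (k + 1) := by positivity
  set q := x / 2 ^ (k + 1) with hq
  set r := x % 2 ^ (k + 1) with hr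
  have hx : x = 2 ^ (k + 1) * q + r := (Int.mul_ediv_add_emod x (2 ^ (k+1))).symm
  have hr0 : 0 ≤ r := Int.emod_nonneg x (by positivity)
  have hr1 : r < 2 ^ (k + 1) := Int.emod_lt_of_pos x h2k1
  have hxr : x = r + 2 ^ k * (2 * q) := by rw [hx]; ring
  have h1 : x % 2 ^ k = r % 2 ^ k := by rw [hxr, Int.add_mul_emod_self_left]
  have h2 : x / 2 ^ k = r / 2 ^ k + 2 * q := by
    rw [hxr, Int.add_mul_ediv_left _ _ (ne_of_gt h2k)]
  have hrd0 : 0 ≤ r / 2 ^ k := Int.ediv_nonneg hr0 h2k.le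
  have hrd1 : r / 2 ^ k < 2 := by
    rw [Int.ediv_lt_iff_lt_mul h2k]
    calc r < 2 ^ (k+1) := hr1
      _ = 2 * 2 ^ k := by ring
  have h3 : (x / 2 ^ k) % 2 = r / 2 ^ k := by
    rw [h2, Int.add_mul_emod_self_left, Int.emod_eq_of_lt hrd0 hrd1]
  have h4 : r % 2 ^ k = r - 2 ^ k * (r / 2 ^ k) := by
    have := Int.mul_ediv_add_emod r (2 ^ k); omega
  rw [h1, h3, h4]; ring

-- A's per-bit accumulation loop computes (m >> s) mod 2^k
lemma bit_loop (m : Int) (s : Nat) : ∀ k : Nat,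
    (List.range k).foldl (fun acc j =>
        if PySem.Int.band (m >>> (s + j)) 1 = 1 then PySem.Int.bor acc ((1 : Int) <<< j) else acc) 0
      = (m >>> s) % (2 ^ k) := by
  intro k
  induction k with
  | zero => simp
  | succ k ih =>
    rw [List.range_succ, List.foldl_append, List.foldl_cons, List.foldl_nil, ih]
    set x := m >>> s with hxs
    have hsa : m >>> (s + k) = x >>> k := by rw [Int.shiftRight_add]
    have hdiv : x >>> k = x / 2 ^ k := by
      rw [Int.shiftRight_eq_div_pow]; push_cast; ring_nf
    have hcond : PySem.Int.band (m >>> (s + k)) 1 = PySem.Int.mod (x / 2 ^ k) 2 := by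
      rw [hsa, hdiv, PySem.Int.band_one]
    rw [hcond, PySem.Int.mod_eq_emod_of_pos (by norm_num)]
    have h2k : (0 : Int) < 2 ^ k := by positivity
    have hm0 : 0 ≤ x % 2 ^ k := Int.emod_nonneg x (ne_of_gt h2k)
    have hm1 : x % 2 ^ k < 2 ^ k := Int.emod_lt_of_pos x h2k
    have hb01 : (x / 2 ^ k) % 2 = 0 ∨ (x / 2 ^ k) % 2 = 1 := by omega
    by_cases hb : (x / 2 ^ k) % 2 = 1
    · rw [if_pos hb, bor_high_bit _ _ hm0 hm1, emod_two_pow_succ, hb]; ring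
    · rw [if_neg hb, emod_two_pow_succ]
      rcases hb01 with h0 | h0
      · rw [h0]; ring
      · exact absurd h0 hb

-- A's outer set-loop over a zero-initialised list builds the list of row values
lemma foldl_set_range_aux (inner : Nat → Int → Int) (K : Nat) :
    ∀ k : Nat, k ≤ K →
      List.foldl (fun (l : List Int) (j : Nat) => l.set j (inner j (l.getD j 0)))
        (List.replicate K 0) (List.range k)
      = (List.range k).map (fun j => inner j 0) ++ List.replicate (K - k) 0 := by
  intro k
  induction k with
  | zero => simp
  | succ k ih =>
    intro hk
    rw [List.range_succ, List.foldl_append, ih (by omega), List.foldl_cons, List.foldl_nil]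
    have hrep : List.replicate (K - k) (0 : Int) = 0 :: List.replicate (K - (k + 1)) 0 := by
      have : K - k = (K - (k + 1)) + 1 := by omega
      rw [this, List.replicate_succ]
    rw [hrep]
    have hlen : ((List.range k).map (fun j => inner j 0)).length = k := by simp
    have hget : ((List.range k).map (fun j => inner j 0) ++ 0 :: List.replicate (K - (k+1)) (0:Int)).getD k 0 = 0 := by
      rw [List.getD, List.getElem?_append_right (by omega), hlen]
      simp
    rw [hget, List.set_append_right _ _ (by omega), hlen]
    simp

lemma foldl_set_range (inner : Nat → Int → Int) (k : Nat) :
    List.foldl (fun (l : List Int) (j : Nat) => l.set j (inner j (l.getD j 0)))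
      (List.replicate k 0) (List.range k)
    = (List.range k).map (fun j => inner j 0) := by
  have := foldl_set_range_aux inner k k le_rfl
  simpa using this

lemma enum_map_range (g : Nat → Int) (r : Nat) :
    PySem.List.enumerate ((List.range r).map g) 0 = (List.range r).map (fun (j : Nat) => ((j : Int), g j)) := by
  apply List.ext_getElem?
  intro k
  simp [PySem.List.getElem?_enumerate, List.getElem?_map]
  by_cases hk : k < r
  · simp [hk]
  · have : (List.range r)[k]? = none := by simp; omega
    simp [this]

-- ===== VERDICT (by name: the statement is the Claim_ definition above) =====
theorem split_graph_spec : Claim_equal_split_graph := by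
  intro n adj _ hpre
  unfold Pre_split_graph at hpre
  unfold Spec_split_graph
  have hfd : PySem.Int.floordiv n 2 = n / 2 := PySem.Int.floordiv_eq_ediv_of_pos (by norm_num)
  by_cases hn : n ≤ 0
  · have h1 : n / 2 ≤ 0 := by omega
    have h2 : n ≤ n / 2 := by omega
    simp only [split_graph, split_graph_alt, hfd]
    rw [PySem.List.pyRange_one_eq_nil h1, PySem.List.pyRange_one_eq_nil h2]
    simp [Int.toNat_of_nonpos h1, Int.toNat_of_nonpos (by omega : n - n / 2 ≤ 0), PySem.List.enumerate]
  · push Not at hn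
    have hlen : n ≤ (adj.length : Int) := by rcases hpre with h | h; exact h; omega
    set k : Nat := (n / 2).toNat with hkdef
    set r : Nat := (n - n / 2).toNat with hrdef
    have hk : n / 2 = (k : Int) := by omega
    have hr : n - n / 2 = (r : Int) := by omega
    simp only [split_graph, split_graph_alt, hfd, hk]
    rw [PySem.List.pyRange_zero_natCast, PySem.List.pyRange_one]
    have hrn : ((n - (k:Int)).toNat) = r := by omega
    rw [hrn, enum_map_range (fun j => ((k:Nat) : Int) + (j : Int)) r]
    simp only [List.foldl_map, List.map_map, Int.toNat_natCast,
      PySem.List.pySetD_natCast, PySem.List.pyGetD_natCast]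
    simp only [← Nat.cast_add, Int.toNat_natCast, Int.shiftRight_natCast_right,
      Int.shiftLeft_natCast_right, PySem.List.pyGetD_natCast]
    simp only [Prod.mk.injEq, true_and, and_true]
    refine ⟨?_, ?_⟩
    · rw [foldl_set_range (fun (y : Nat) (a : Int) => List.foldl
        (fun (x : Int) (y_1 : Nat) => if PySem.Int.band (adj.getD y 0 >>> y_1) 1 = 1 then PySem.Int.bor x ((1 : Int) <<< y_1) else x)
        a (List.range k)) k]
      refine List.map_congr_left ?_
      intro j hj
      simp only [Function.comp_apply, PySem.List.pyGetD_natCast]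
      have hb := bit_loop (adj.getD j 0) 0 k
      simp only [Nat.zero_add, Int.shiftRight_zero] at hb
      rw [hb, band_mask]
    · rw [foldl_set_range (fun (y : Nat) (a : Int) => List.foldl
        (fun (x : Int) (y_1 : Nat) => if PySem.Int.band (adj.getD (k + y) 0 >>> (k + y_1)) 1 = 1 then PySem.Int.bor x ((1 : Int) <<< y_1) else x)
        a (List.range r)) r]
      refine List.map_congr_left ?_
      intro j hj
      simp only [Function.comp_apply, PySem.List.pyGetD_natCast]
      rw [bit_loop (adj.getD (k + j) 0) k r, band_mask]
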